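-- pv_equiv track=rewrite | github.com/toteload/advent-of-code | 2024/day15.py | update
-- ===== SOURCE A (Python) =====
-- def update(row):
--     row = row[:]
--     last_free = None
--     p = None
--
--     for i, v in enumerate(row):
--         if v == '@':
--             p = i
--             break
--
--         if v == '.':
--             last_free = i
--
--         if v == '#':
--             last_free = None
--
--     if last_free == None:
--         return row
--
--     patch = row[last_free+1:p+1] + ['.']
--     row[last_free:p+1] = patch
--
--     return row
-- ===== SOURCE B (Python) =====
-- def update(row):
--     row = row[:]
--     # find the robot with an explicit forward scan
--     p = None
--     for i in range(len(row)):
--         if row[i] == '@':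
--             p = i
--             break
--     if p is None:
--         return row
--     # scan leftward from the robot for the nearest free cell, stopping at a wall
--     j = p - 1
--     while j >= 0:
--         if row[j] == '.':
--             del row[j]
--             row.insert(p, '.')
--             return row
--         if row[j] == '#':
--             return row
--         j -= 1
--     return row
-- ===== Notes on version B (the rewrite author's own statement) =====
-- stated objective: alternative
-- what changed: B replaces A's single forward scan with running last_free/wall-reset state plus a slice-rotate splice by: find the robot with a forward loop, then scan LEFTWARD from the robot for the nearest free cell stopping at a wall, and perform the shift as del-at-free + insert('.') at the robot; Pre_ excludes rows with no '@' but a '.' with no '#' after it, on which A raises TypeError (None+1).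
import Mathlib
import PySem

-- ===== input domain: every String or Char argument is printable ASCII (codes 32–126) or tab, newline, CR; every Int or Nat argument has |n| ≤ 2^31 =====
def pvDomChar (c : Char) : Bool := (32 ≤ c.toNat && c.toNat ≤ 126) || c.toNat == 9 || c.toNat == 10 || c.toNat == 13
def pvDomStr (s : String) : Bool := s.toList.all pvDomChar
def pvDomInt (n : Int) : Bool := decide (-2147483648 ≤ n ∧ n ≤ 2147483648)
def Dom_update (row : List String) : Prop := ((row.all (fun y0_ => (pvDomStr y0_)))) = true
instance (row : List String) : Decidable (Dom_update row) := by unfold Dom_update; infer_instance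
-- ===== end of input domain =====

-- B finds the robot with a forward loop, then scans LEFTWARD from it for the nearest
-- free cell (stopping at a wall) and shifts via del+insert; alternative decomposition, same cost.

-- ===== PORT A =====
-- the enumerate loop with last_free/p state; breaks at '@'
def updateScan : List String → Nat → Option Nat → Option Nat × Option Nat
  | [], _, lf => (lf, none)
  | v :: rest, i, lf =>
    if v = "@" then (lf, some i)
    else updateScan rest (i + 1) (if v = "." then some i else if v = "#" then none else lf)

def update (row : List String) : List String :=
  match updateScan row 0 none with
  | (none, _) => row
  | (some _, none) => row   -- Python raises TypeError (None + 1) here; excluded by Pre_update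
  | (some f, some p) =>
    let patch := PySem.List.slice row (some ((f : Int) + 1)) (some ((p : Int) + 1)) ++ ["."]
    row.take f ++ patch ++ row.drop (p + 1)

-- ===== PORT B =====
-- forward loop: index of the first '@'
def findRobot : List String → Nat → Option Nat
  | [], _ => none
  | v :: rest, i => if v = "@" then some i else findRobot rest (i + 1)

-- leftward while-loop from index k-1 down: first '.', stop at '#' or at the start
def scanLeft (row : List String) : Nat → Option Nat
  | 0 => none
  | k + 1 =>
    let v := row.getD k ""
    if v = "." then some k else if v = "#" then none else scanLeft row k

def update_alt (row : List String) : List String :=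
  match findRobot row 0 with
  | none => row
  | some p =>
    match scanLeft row p with
    | none => row
    | some f =>
      let r := row.take f ++ row.drop (f + 1)      -- del row[f]
      PySem.List.insert r (p : Int) "."            -- row.insert(p, '.')

-- ===== PRECONDITION & SPEC =====
-- Pre_ excludes exactly the rows on which A raises TypeError: no '@' present while the
-- scan leaves last_free set (a '.' with no '#' anywhere after it).
def Pre_update (row : List String) : Prop :=
  "@" ∈ row ∨ ∀ j, j < row.length → row.getD j "" = "." →
    ∃ k, k < row.length ∧ j < k ∧ row.getD k "" = "#"
instance (row : List String) : Decidable (Pre_update row) := by unfold Pre_update; infer_instance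

def pvWitness_update : List String := ["#", ".", "O", "@", "."]

def Spec_update (row : List String) (out : List String) : Prop := out = update_alt row
instance (row : List String) (out : List String) : Decidable (Spec_update row out) := by unfold Spec_update; infer_instance

-- ===== CLAIM (what is proved, stated in full; the proofs are below) =====
def Claim_equal_update : Prop := ∀ (row : List String), Dom_update row → Pre_update row → Spec_update row (update row)

-- ===== LEMMAS AND PROOFS =====

-- the last_free accumulator of A's loop, in isolation
def lfFold : List String → Nat → Option Nat → Option Nat
  | [], _, lf => lf
  | v :: rest, i, lf => lfFold rest (i + 1) (if v = "." then some i else if v = "#" then none else lf)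

theorem updateScan_no_robot (row : List String) (i : Nat) (lf : Option Nat)
    (h : "@" ∉ row) : updateScan row i lf = (lfFold row i lf, none) := by
  induction row generalizing i lf with
  | nil => rfl
  | cons v rest ih =>
    simp only [List.mem_cons, not_or] at h
    simp only [updateScan, lfFold]
    rw [if_neg (fun hv => h.1 (Eq.symm hv))]
    exact ih _ _ h.2

theorem updateScan_robot (pre post : List String) (i : Nat) (lf : Option Nat)
    (h : "@" ∉ pre) :
    updateScan (pre ++ "@" :: post) i lf = (lfFold pre i lf, some (i + pre.length)) := by
  induction pre generalizing i lf with
  | nil => simp [updateScan, lfFold]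
  | cons v rest ih =>
    simp only [List.mem_cons, not_or] at h
    simp only [List.cons_append, updateScan, lfFold]
    rw [if_neg (fun hv => h.1 (Eq.symm hv)), ih _ _ h.2]
    simp [List.length_cons]; omega

theorem findRobot_no (row : List String) (i : Nat) (h : "@" ∉ row) :
    findRobot row i = none := by
  induction row generalizing i with
  | nil => rfl
  | cons v rest ih =>
    simp only [List.mem_cons, not_or] at h
    simp only [findRobot]
    rw [if_neg (fun hv => h.1 (Eq.symm hv))]
    exact ih _ h.2

theorem findRobot_yes (pre post : List String) (i : Nat) (h : "@" ∉ pre) :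
    findRobot (pre ++ "@" :: post) i = some (i + pre.length) := by
  induction pre generalizing i with
  | nil => simp [findRobot]
  | cons v rest ih =>
    simp only [List.mem_cons, not_or] at h
    simp only [List.cons_append, findRobot]
    rw [if_neg (fun hv => h.1 (Eq.symm hv)), ih _ h.2]
    simp [List.length_cons]; omega

theorem scanLeft_prefix (xs ys : List String) (k : Nat) (hk : k ≤ xs.length) :
    scanLeft (xs ++ ys) k = scanLeft xs k := by
  induction k with
  | zero => rfl
  | succ n ih =>
    have hlt : n < xs.length := by omega
    simp only [scanLeft, List.getD_append _ _ _ _ hlt]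
    rw [ih (by omega)]

theorem scanLeft_lt (xs : List String) (k f : Nat) (h : scanLeft xs k = some f) : f < k := by
  induction k with
  | zero => simp [scanLeft] at h
  | succ n ih =>
    simp only [scanLeft] at h
    split_ifs at h with h1 h2
    · injection h with h'; omega
    · have := ih h; omega

theorem scanLeft_spec (xs : List String) (k f : Nat) (h : scanLeft xs k = some f) :
    xs.getD f "" = "." ∧ ∀ m, f < m → m < k → xs.getD m "" ≠ "#" := by
  induction k with
  | zero => simp [scanLeft] at h
  | succ n ih =>
    simp only [scanLeft] at h
    split_ifs at h with h1 h2
    · injection h with h'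
      subst h'
      exact ⟨h1, fun m hm1 hm2 => False.elim (by omega)⟩
    · obtain ⟨hd, hns⟩ := ih h
      have hfn := scanLeft_lt xs n f h
      refine ⟨hd, fun m hm1 hm2 => ?_⟩
      by_cases hmn : m = n
      · subst hmn; exact h2
      · exact hns m hm1 (by omega)

theorem lfFold_append (xs : List String) (v : String) (i : Nat) (lf : Option Nat) :
    lfFold (xs ++ [v]) i lf =
      if v = "." then some (i + xs.length)
      else if v = "#" then none else lfFold xs i lf := by
  induction xs generalizing i lf with
  | nil => simp [lfFold]
  | cons w rest ih =>
    simp only [List.cons_append, lfFold, ih]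
    simp [List.length_cons]
    split_ifs <;> simp; omega

theorem lfFold_eq_scanLeft (pre : List String) :
    lfFold pre 0 none = scanLeft pre pre.length := by
  induction pre using List.reverseRecOn with
  | nil => rfl
  | append_singleton xs v ih =>
    rw [lfFold_append]
    have hlen : (xs ++ [v]).length = xs.length + 1 := by simp
    rw [hlen]
    simp only [scanLeft]
    have hget : (xs ++ [v]).getD xs.length "" = v := by
      simp [List.getD]
    rw [hget]
    split_ifs with h1 h2
    · simp
    · rfl
    · rw [scanLeft_prefix xs [v] xs.length (le_refl _), ih]

theorem mem_decomp (row : List String) (h : "@" ∈ row) :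
    ∃ pre post, row = pre ++ "@" :: post ∧ "@" ∉ pre := by
  induction row with
  | nil => simp at h
  | cons v rest ih =>
    by_cases hv : v = "@"
    · exact ⟨[], rest, by rw [hv]; rfl, by simp⟩
    · have : "@" ∈ rest := by
        rcases List.mem_cons.mp h with h1 | h1
        · exact absurd h1.symm hv
        · exact h1
      obtain ⟨pre, post, heq, hnm⟩ := ih this
      exact ⟨v :: pre, post, by rw [heq]; rfl, by simp only [List.mem_cons, not_or]; exact ⟨fun he => hv (Eq.symm he), hnm⟩⟩

theorem shift_eq (row : List String) (f p : Nat) (hf : f < p) (hp : p < row.length) :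
    row.take f ++ ((PySem.List.slice row (some ((f : Int) + 1)) (some ((p : Int) + 1)) ++ ["."])) ++ row.drop (p + 1)
      = PySem.List.insert (row.take f ++ row.drop (f + 1)) (p : Int) "." := by
  have hcast1 : ((f : Int) + 1) = (((f + 1 : Nat)) : Int) := by push_cast; ring
  have hcast2 : ((p : Int) + 1) = (((p + 1 : Nat)) : Int) := by push_cast; ring
  rw [hcast1, hcast2, PySem.List.slice_natCast]
  have hrlen : (row.take f ++ row.drop (f + 1)).length = row.length - 1 := by
    simp [List.length_take, List.length_drop]; omega
  rw [PySem.List.insert_natCast _ p _ (by omega)]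
  rw [List.take_append, List.drop_append]
  have hlt : (row.take f).length = f := by simp [List.length_take]; omega
  rw [hlt]
  have h1 : (row.take f).take p = row.take f := by
    rw [List.take_take]; congr 1; omega
  have h2 : (row.take f).drop p = [] := List.drop_eq_nil_of_le (by omega)
  rw [h1, h2]
  have h3 : (row.drop (f + 1)).drop (p - f) = row.drop (p + 1) := by
    rw [List.drop_drop]; congr 1; omega
  rw [h3]
  have h4 : p + 1 - (f + 1) = p - f := by omega
  simp [h4, List.append_assoc]

-- ===== VERDICT (by name: the statement is the Claim_ definition above) =====
theorem update_spec : Claim_equal_update := by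
  intro row _ hpre
  unfold Spec_update
  by_cases hmem : "@" ∈ row
  · obtain ⟨pre, post, heq, hnm⟩ := mem_decomp row hmem
    subst heq
    have hscan := updateScan_robot pre post 0 none hnm
    have hfind := findRobot_yes pre post 0 hnm
    have hlf : lfFold pre 0 none = scanLeft (pre ++ "@" :: post) pre.length := by
      rw [lfFold_eq_scanLeft, scanLeft_prefix pre ("@" :: post) pre.length (le_refl _)]
    unfold update update_alt
    rw [hscan, hfind]
    simp only [Nat.zero_add]
    cases hsl : scanLeft (pre ++ "@" :: post) pre.length with
    | none => rw [hlf, hsl]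
    | some f =>
      rw [hlf, hsl]
      have hflt : f < pre.length := scanLeft_lt _ _ _ hsl
      have hplen : pre.length < (pre ++ "@" :: post).length := by simp
      exact shift_eq _ f pre.length hflt hplen
  · have hlfn : lfFold row 0 none = none := by
      cases hlfc : lfFold row 0 none with
      | none => rfl
      | some f =>
        exfalso
        rw [lfFold_eq_scanLeft] at hlfc
        obtain ⟨hdot, hns⟩ := scanLeft_spec row row.length f hlfc
        have hflt := scanLeft_lt row row.length f hlfc
        rcases hpre with h | h
        · exact hmem h
        · obtain ⟨k, hk2, hk1, hk3⟩ := h f hflt hdot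
          exact hns k hk1 hk2 hk3
    unfold update update_alt
    rw [updateScan_no_robot row 0 none hmem, hlfn, findRobot_no row 0 hmem]
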